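-- pv_equiv track=rewrite | github.com/bensonchow123/portfolio_website | app.py | get_largest_image
-- ===== SOURCE A (Python) =====
-- def get_largest_image(images):
--     """Get the largest available image from Last.fm image array"""
--     if not images:
--         return ''
--
--     size_priority = ['extralarge', 'large', 'medium', 'small']
--
--     for size in size_priority:
--         for img in images:
--             if img.get('size') == size and img.get('#text'):
--                 return img['#text']
--
--     return images[0].get('#text', '') if images else ''
-- ===== SOURCE B (Python) =====
-- def get_largest_image(images):
--     """Get the largest available image from Last.fm image array"""
--     if not images:
--         return ''
--     size_priority = ['extralarge', 'large', 'medium', 'small']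
--     best = None
--     for img in images:
--         text = img.get('#text')
--         size = img.get('size')
--         if text and size in size_priority:
--             rank = size_priority.index(size)
--             if best is None or rank < best[0]:
--                 best = (rank, text)
--     if best is None:
--         return images[0].get('#text', '')
--     return best[1]
-- ===== Notes on version B (the rewrite author's own statement) =====
-- stated objective: alternative
-- what changed: Replaces A's per-priority-size rescans of the image list with a single pass keeping the best (lowest-rank, text) candidate seen so far, then one fallback check.
import Mathlib
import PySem

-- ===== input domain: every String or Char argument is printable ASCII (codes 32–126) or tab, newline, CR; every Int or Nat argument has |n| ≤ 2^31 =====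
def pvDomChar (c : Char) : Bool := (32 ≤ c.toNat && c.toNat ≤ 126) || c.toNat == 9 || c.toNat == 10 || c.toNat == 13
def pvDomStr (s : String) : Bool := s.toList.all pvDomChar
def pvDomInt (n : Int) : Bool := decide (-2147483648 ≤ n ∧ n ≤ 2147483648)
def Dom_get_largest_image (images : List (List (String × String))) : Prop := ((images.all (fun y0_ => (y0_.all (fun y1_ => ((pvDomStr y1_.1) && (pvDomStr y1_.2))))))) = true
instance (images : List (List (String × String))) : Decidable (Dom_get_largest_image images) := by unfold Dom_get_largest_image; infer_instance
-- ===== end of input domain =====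

-- B replaces A's nested loops (rescan images once per priority size) with a single pass over
-- images keeping the best (lowest-priority-rank, text) candidate seen so far (objective: simpler).

-- ===== PORT A =====
-- inner loop: 'for img in images: if img.get('size') == size and img.get('#text'): return img['#text']'
def pvAScan (size : String) : List (List (String × String)) → Option String
  | [] => none
  | img :: rest =>
      if (PySem.Dict.mk img).get? "size" = some size ∧ ((PySem.Dict.mk img).get? "#text").getD "" ≠ "" then
        some (((PySem.Dict.mk img).get? "#text").getD "")
      else
        pvAScan size rest

-- outer loop: 'for size in size_priority: …'
def pvAOuter (images : List (List (String × String))) : List String → Option String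
  | [] => none
  | size :: rest =>
      match pvAScan size images with
      | some t => some t
      | none => pvAOuter images rest

def get_largest_image (images : List (List (String × String))) : String :=
  if images = [] then ""
  else
    match pvAOuter images ["extralarge", "large", "medium", "small"] with
    | some t => t
    | none =>
        match images with
        | [] => ""  -- 'if images else ""' arm of the final conditional expression
        | img :: _ => ((PySem.Dict.mk img).get? "#text").getD ""

-- ===== PORT B =====
def pvBPrios : List String := ["extralarge", "large", "medium", "small"]

-- loop body: 'text = img.get('#text'); size = img.get('size');
--             if text and size in size_priority:
--                 rank = size_priority.index(size)
--                 if best is None or rank < best[0]: best = (rank, text)'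
-- ('size in size_priority' followed by '.index(size)' is ported as one PySem.List.index? call:
--  none exactly when the membership test is False, and Python's 'None in [strings]' is False)
def pvBStep (prios : List String) (best : Option (Nat × String)) (img : List (String × String)) :
    Option (Nat × String) :=
  let text := ((PySem.Dict.mk img).get? "#text").getD ""
  if text = "" then best
  else
    match (PySem.Dict.mk img).get? "size" with
    | none => best
    | some s =>
        match PySem.List.index? prios s with
        | none => best
        | some rank =>
            match best with
            | none => some (rank, text)
            | some b => if rank < b.1 then some (rank, text) else some b

def get_largest_image_alt (images : List (List (String × String))) : String :=
  if images = [] then ""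
  else
    match images.foldl (pvBStep pvBPrios) none with
    | some b => b.2
    | none =>
        match images with
        | [] => ""
        | img :: _ => ((PySem.Dict.mk img).get? "#text").getD ""

-- ===== PRECONDITION & SPEC =====
def Spec_get_largest_image (images : List (List (String × String))) (out : String) : Prop := out = get_largest_image_alt images
instance (images : List (List (String × String))) (out : String) : Decidable (Spec_get_largest_image images out) := by unfold Spec_get_largest_image; infer_instance

-- ===== CLAIM =====
def Claim_equal_get_largest_image : Prop := ∀ (images : List (List (String × String))), Dom_get_largest_image images → Spec_get_largest_image images (get_largest_image images)

-- ===== LEMMAS AND PROOFS =====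

-- the candidate a single image contributes: (rank of its size in prios, its text), if admissible
def pvCand (prios : List String) (img : List (String × String)) : Option (Nat × String) :=
  if ((PySem.Dict.mk img).get? "#text").getD "" = "" then none
  else
    match (PySem.Dict.mk img).get? "size" with
    | none => none
    | some s => (PySem.List.index? prios s).map (fun r => (r, ((PySem.Dict.mk img).get? "#text").getD ""))

-- keep-first minimum selection step
def pvSel (best : Option (Nat × String)) (c : Nat × String) : Option (Nat × String) :=
  match best with
  | none => some c
  | some b => if c.1 < b.1 then some c else some b

lemma pvBStep_eq_sel (prios : List String) (acc : Option (Nat × String)) (img : List (String × String)) :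
    pvBStep prios acc img = (pvCand prios img).elim acc (pvSel acc) := by
  unfold pvBStep pvCand pvSel
  by_cases ht : ((PySem.Dict.mk img).get? "#text").getD "" = ""
  · rw [if_pos ht, if_pos ht]; rfl
  · rw [if_neg ht, if_neg ht]
    cases hs : (PySem.Dict.mk img).get? "size" with
    | none => rfl
    | some s =>
        dsimp only
        cases hi : PySem.List.index? prios s with
        | none => rfl
        | some r => cases acc <;> rfl

lemma pvFold_eq_sel (prios : List String) (images : List (List (String × String)))
    (acc : Option (Nat × String)) :
    images.foldl (pvBStep prios) acc = (images.filterMap (pvCand prios)).foldl pvSel acc := by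
  induction images generalizing acc with
  | nil => rfl
  | cons img rest ih =>
      simp only [List.foldl_cons, List.filterMap_cons, pvBStep_eq_sel]
      cases h : pvCand prios img with
      | none => simp only [Option.elim, ih]
      | some c => simp only [Option.elim, ih, List.foldl_cons]

lemma pvCand_nil (img : List (String × String)) : pvCand [] img = none := by
  unfold pvCand
  by_cases ht : ((PySem.Dict.mk img).get? "#text").getD "" = ""
  · rw [if_pos ht]
  · rw [if_neg ht]
    cases hs : (PySem.Dict.mk img).get? "size" with
    | none => rfl
    | some s =>
        dsimp only
        rw [(PySem.List.index?_eq_none_iff [] s).mpr (by simp)]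
        rfl

-- once the fold holds a rank-0 candidate, no later candidate displaces it
lemma pvSel_stays (cs : List (Nat × String)) (t : String) :
    cs.foldl pvSel (some (0, t)) = some (0, t) := by
  induction cs with
  | nil => rfl
  | cons c rest ih =>
      simp only [List.foldl_cons, pvSel]
      rw [if_neg (by omega)]
      exact ih

lemma pvScan_none_cond (s : String) (images : List (List (String × String)))
    (h : pvAScan s images = none) :
    ∀ img ∈ images, ¬((PySem.Dict.mk img).get? "size" = some s ∧ ((PySem.Dict.mk img).get? "#text").getD "" ≠ "") := by
  induction images with
  | nil => intro img hm; cases hm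
  | cons i rest ih =>
      unfold pvAScan at h
      intro img hm
      by_cases hc : (PySem.Dict.mk i).get? "size" = some s ∧ ((PySem.Dict.mk i).get? "#text").getD "" ≠ ""
      · rw [if_pos hc] at h; cases h
      · rw [if_neg hc] at h
        rcases List.mem_cons.mp hm with rfl | hm
        · exact hc
        · exact ih h img hm

-- an image that does not satisfy A's condition for the head size gets rank ≥ 1 (if any)
lemma pvCand_rank_pos (s : String) (rest : List String) (img : List (String × String))
    (c : Nat × String)
    (hc : ¬((PySem.Dict.mk img).get? "size" = some s ∧ ((PySem.Dict.mk img).get? "#text").getD "" ≠ ""))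
    (hcand : pvCand (s :: rest) img = some c) : 1 ≤ c.1 := by
  unfold pvCand at hcand
  by_cases ht : ((PySem.Dict.mk img).get? "#text").getD "" = ""
  · rw [if_pos ht] at hcand; cases hcand
  · rw [if_neg ht] at hcand
    cases hs : (PySem.Dict.mk img).get? "size" with
    | none => rw [hs] at hcand; cases hcand
    | some str =>
        rw [hs] at hcand
        dsimp only at hcand
        have hne : s ≠ str := fun he => hc ⟨by rw [hs, he], ht⟩
        rw [PySem.List.index?_cons_of_ne rest hne] at hcand
        cases hi : PySem.List.index? rest str with
        | none => rw [hi] at hcand; cases hcand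
        | some r =>
            rw [hi] at hcand
            dsimp only [Option.map_some] at hcand
            injection hcand with hcand
            subst hcand
            show 1 ≤ r + 1
            omega

-- if A's inner scan for the head size succeeds, the keep-first fold yields exactly that text at rank 0
lemma pvScan_some_fold (s : String) (rest : List String) (t : String) :
    ∀ (images : List (List (String × String))) (acc : Option (Nat × String)),
      pvAScan s images = some t →
      (∀ b, acc = some b → 1 ≤ b.1) →
      (images.filterMap (pvCand (s :: rest))).foldl pvSel acc = some (0, t) := by
  intro images
  induction images with
  | nil => intro acc h _; cases h
  | cons img tl ih =>
      intro acc h hacc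
      unfold pvAScan at h
      by_cases hc : (PySem.Dict.mk img).get? "size" = some s ∧ ((PySem.Dict.mk img).get? "#text").getD "" ≠ ""
      · rw [if_pos hc] at h
        injection h with h; subst h
        have hcand : pvCand (s :: rest) img = some (0, ((PySem.Dict.mk img).get? "#text").getD "") := by
          unfold pvCand
          rw [if_neg hc.2, hc.1]
          dsimp only
          rw [PySem.List.index?_cons_self]
          rfl
        rw [List.filterMap_cons, hcand]
        dsimp only
        rw [List.foldl_cons]
        have hsel : pvSel acc (0, ((PySem.Dict.mk img).get? "#text").getD "") =
            some (0, ((PySem.Dict.mk img).get? "#text").getD "") := by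
          cases hacc2 : acc with
          | none => rfl
          | some b =>
              have hb := hacc b hacc2
              unfold pvSel
              dsimp only
              rw [if_pos (by omega)]
        rw [hsel, pvSel_stays]
      · rw [if_neg hc] at h
        rw [List.filterMap_cons]
        cases hcand : pvCand (s :: rest) img with
        | none => dsimp only; exact ih acc h hacc
        | some c =>
            dsimp only
            rw [List.foldl_cons]
            apply ih _ h
            intro b hb
            have hc1 := pvCand_rank_pos s rest img c hc hcand
            unfold pvSel at hb
            cases hacc2 : acc with
            | none => rw [hacc2] at hb; dsimp only at hb; injection hb with hb; exact hb ▸ hc1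
            | some b0 =>
                rw [hacc2] at hb
                dsimp only at hb
                split at hb <;> (injection hb with hb; subst hb)
                · omega
                · exact hacc b0 hacc2

def pvShift (c : Nat × String) : Nat × String := (c.1 + 1, c.2)

-- when no image matches the head size, the candidate list is the tail's list with all ranks shifted up
lemma pvCand_shift (s : String) (rest : List String) (img : List (String × String))
    (hc : ¬((PySem.Dict.mk img).get? "size" = some s ∧ ((PySem.Dict.mk img).get? "#text").getD "" ≠ "")) :
    pvCand (s :: rest) img = (pvCand rest img).map pvShift := by
  unfold pvCand
  by_cases ht : ((PySem.Dict.mk img).get? "#text").getD "" = ""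
  · rw [if_pos ht, if_pos ht]; rfl
  · rw [if_neg ht, if_neg ht]
    cases hs : (PySem.Dict.mk img).get? "size" with
    | none => rfl
    | some str =>
        dsimp only
        have hne : s ≠ str := fun he => hc ⟨by rw [hs, he], ht⟩
        rw [PySem.List.index?_cons_of_ne rest hne]
        cases hi : PySem.List.index? rest str with
        | none => rfl
        | some r => rfl

lemma pvSel_shift (cs : List (Nat × String)) :
    ∀ acc : Option (Nat × String),
      (cs.map pvShift).foldl pvSel (acc.map pvShift) = (cs.foldl pvSel acc).map pvShift := by
  induction cs with
  | nil => intro acc; rfl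
  | cons c rest ih =>
      intro acc
      simp only [List.map_cons, List.foldl_cons]
      have hstep : pvSel (acc.map pvShift) (pvShift c) = (pvSel acc c).map pvShift := by
        cases acc with
        | none => rfl
        | some b =>
            unfold pvSel pvShift
            dsimp only [Option.map_some]
            by_cases hlt : c.1 < b.1
            · rw [if_pos hlt, if_pos (by omega)]; rfl
            · rw [if_neg hlt, if_neg (by omega)]; rfl
      rw [hstep, ih]

-- A's nested loops compute the keep-first minimum-rank candidate
lemma pvAOuter_eq_min (prios : List String) (images : List (List (String × String))) :
    pvAOuter images prios = ((images.filterMap (pvCand prios)).foldl pvSel none).map Prod.snd := by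
  induction prios with
  | nil =>
      have hnil : images.filterMap (pvCand []) = [] :=
        List.filterMap_eq_nil_iff.mpr (fun a _ => pvCand_nil a)
      rw [hnil]; rfl
  | cons s rest ih =>
      unfold pvAOuter
      cases hscan : pvAScan s images with
      | some t =>
          rw [pvScan_some_fold s rest t images none hscan (by intro b hb; cases hb)]
          rfl
      | none =>
          have hmap : images.filterMap (pvCand (s :: rest)) =
              (images.filterMap (pvCand rest)).map pvShift := by
            rw [List.map_filterMap]
            apply List.filterMap_congr
            intro img hm
            rw [pvCand_shift s rest img (pvScan_none_cond s images hscan img hm)]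
          rw [hmap]
          have hsh := pvSel_shift (images.filterMap (pvCand rest)) none
          dsimp only [Option.map_none] at hsh
          rw [hsh, ih]
          cases (images.filterMap (pvCand rest)).foldl pvSel none with
          | none => rfl
          | some b => rfl

-- ===== VERDICT =====
theorem get_largest_image_spec : Claim_equal_get_largest_image := by
  intro images _
  unfold Spec_get_largest_image get_largest_image get_largest_image_alt
  by_cases hnil : images = []
  · rw [if_pos hnil, if_pos hnil]
  · rw [if_neg hnil, if_neg hnil,
      pvFold_eq_sel pvBPrios images none,
      pvAOuter_eq_min ["extralarge", "large", "medium", "small"] images]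
    simp only [pvBPrios]
    cases hres : (images.filterMap (pvCand ["extralarge", "large", "medium", "small"])).foldl pvSel none with
    | none => rfl
    | some b => rfl
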